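-- pv_equiv track=rewrite | github.com/github-lily/AlgorithmSolve | 프로그래머스/2/42626. 더 맵게/더 맵게.py | solution
-- ===== SOURCE A (Python) =====
-- import heapq as hq
--
-- def solution(scoville, K):
--     q = []
--
--     for score in scoville :
--         hq.heappush(q,score)
--
--     cnt = 0
--
--     while q[0] < K :
--         if len(q) < 2 :
--             return -1
--
--         f1 = hq.heappop(q)
--         f2 = hq.heappop(q)
--
--         spicy = f1 + (f2*2)
--         cnt += 1
--
--         hq.heappush(q,spicy)
--
--     return cnt
-- ===== SOURCE B (Python) =====
-- def solution(scoville, K):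
--     # Plain working list instead of a heap: scan for the minimum twice per round.
--     q = list(scoville)
--     cnt = 0
--     while True:
--         m = min(q)
--         if m >= K:
--             return cnt
--         if len(q) < 2:
--             return -1
--         q.remove(m)
--         m2 = min(q)
--         q.remove(m2)
--         q.append(m + 2 * m2)
--         cnt += 1
-- ===== Notes on version B (the rewrite author's own statement) =====
-- stated objective: simpler
-- what changed: Replaces the heapq min-heap with a plain working list: each round scans for the minimum (and, after removing it, for the new minimum), removes the two smallest and appends the combined value, with no heap maintenance or import.
import Mathlib
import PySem

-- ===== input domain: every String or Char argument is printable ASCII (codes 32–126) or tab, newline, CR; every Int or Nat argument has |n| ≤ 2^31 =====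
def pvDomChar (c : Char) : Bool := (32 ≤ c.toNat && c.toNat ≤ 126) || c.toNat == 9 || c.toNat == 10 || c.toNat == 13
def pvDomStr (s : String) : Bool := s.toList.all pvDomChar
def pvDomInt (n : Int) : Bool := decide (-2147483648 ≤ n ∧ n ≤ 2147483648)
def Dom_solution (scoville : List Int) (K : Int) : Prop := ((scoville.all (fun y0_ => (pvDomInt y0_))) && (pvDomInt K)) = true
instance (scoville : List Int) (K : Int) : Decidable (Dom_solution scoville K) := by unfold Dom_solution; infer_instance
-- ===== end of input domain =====

-- B replaces A's heapq min-heap with a plain working list scanned for its minimum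
-- twice per round (remove the two smallest, append the combined value) — simpler, no
-- heap maintenance; not faster.

-- ===== PORT A =====
-- hq.heappush ported by heapq's contract as an ordered priority queue (insert at the
-- ascending position); exact for Int elements, whose pop order and heap root depend
-- only on the values pushed.
def heappush (q : List Int) (x : Int) : List Int :=
  PySem.List.insertBy (fun a b => decide (a < b)) x q

-- needed by heapLoop's termination proof
theorem length_insertBy (before : Int → Int → Bool) (x : Int) (ys : List Int) :
    (PySem.List.insertBy before x ys).length = ys.length + 1 := by
  induction ys with
  | nil => rfl
  | cons y t ih =>
    simp only [PySem.List.insertBy]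
    split
    · simp
    · simpa using ih

-- the 'while q[0] < K' loop of A; q is the heap (kept in ascending order).
-- The [] branch is unreachable from a nonempty initial heap (Pre_ excludes []):
-- Python raises IndexError on q[0] there.
def heapLoop (K : Int) (q : List Int) (cnt : Int) : Int :=
  match q with
  | [] => -1
  | a :: t =>
    if a < K then
      match t with
      | [] => -1                                            -- len(q) < 2
      | b :: t' => heapLoop K (heappush t' (a + b * 2)) (cnt + 1)
    else cnt
termination_by q.length
decreasing_by simp [heappush, length_insertBy]

def solution (scoville : List Int) (K : Int) : Int :=
  heapLoop K (scoville.foldl (fun q x => heappush q x) []) 0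

-- ===== PORT B =====
-- the 'while True' loop of Source B; min(q) is the running-min fold, q.remove(m) is
-- List.erase (first occurrence).  The [] branch is where min([]) raises ValueError
-- (excluded by Pre_); the inner [] branch is unreachable (len(q) ≥ 2 there).
def altLoop (K : Int) (q : List Int) (cnt : Int) : Int :=
  match q with
  | [] => -1
  | x :: t =>
    if K ≤ List.foldl min x t then cnt                      -- m = min(q); m >= K
    else if (x :: t).length < 2 then -1
    else
      match h1 : (x :: t).erase (List.foldl min x t) with   -- q.remove(m)
      | [] => -1
      | y :: t1 =>                                          -- m2 = min(q)
        altLoop K ((y :: t1).erase (List.foldl min y t1)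
          ++ [List.foldl min x t + 2 * List.foldl min y t1]) (cnt + 1)
termination_by q.length
decreasing_by
  simp only [List.foldl_attach] at h1 ⊢
  have hmem : List.foldl min y t1 = y ∨ List.foldl min y t1 ∈ t1 :=
    PySem.List.foldl_min_mem t1 y
  have hm2 : List.foldl min y t1 ∈ y :: t1 := by
    rcases hmem with h | h
    · simp [h]
    · exact List.mem_cons_of_mem _ h
  have hlen1 : ((y :: t1).erase (List.foldl min y t1)).length + 1 = (y :: t1).length :=
    List.length_erase_add_one hm2
  have hminmem : List.foldl min x t = x ∨ List.foldl min x t ∈ t :=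
    PySem.List.foldl_min_mem t x
  have hmmem : List.foldl min x t ∈ x :: t := by
    rcases hminmem with h | h
    · simp [h]
    · exact List.mem_cons_of_mem _ h
  have hlen0 : ((x :: t).erase (List.foldl min x t)).length + 1 = (x :: t).length :=
    List.length_erase_add_one hmmem
  rw [h1] at hlen0
  simp only [List.length_append, List.length_cons, List.length_nil] at *
  omega

def solution_alt (scoville : List Int) (K : Int) : Int :=
  altLoop K scoville 0

-- ===== PRECONDITION & SPEC =====
-- Pre_ excludes exactly the empty list, on which A raises IndexError at q[0]
-- (and B raises ValueError at min(q)).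
def Pre_solution (scoville : List Int) (K : Int) : Prop := scoville ≠ []
instance (scoville : List Int) (K : Int) : Decidable (Pre_solution scoville K) := by
  unfold Pre_solution; infer_instance

def pvWitness_solution : List Int × Int := ([1, 2, 3, 9, 10, 12], 7)

def Spec_solution (scoville : List Int) (K : Int) (out : Int) : Prop := out = solution_alt scoville K
instance (scoville : List Int) (K : Int) (out : Int) : Decidable (Spec_solution scoville K out) := by
  unfold Spec_solution; infer_instance

-- ===== CLAIM (what is proved, stated in full; the proofs are below) =====
def Claim_equal_solution : Prop := ∀ (scoville : List Int) (K : Int), Dom_solution scoville K → Pre_solution scoville K → Spec_solution scoville K (solution scoville K)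

-- ===== LEMMAS AND PROOFS =====

-- the running min of a list whose head is a lower bound is the head
theorem foldl_min_head (a : Int) (t : List Int) (h : ∀ y ∈ t, a ≤ y) :
    List.foldl min a t = a := by
  have h1 := (PySem.List.foldl_min_le t a).1
  rcases PySem.List.foldl_min_mem t a with he | hm
  · exact he
  · exact le_antisymm h1 (h _ hm)

-- the running min is invariant under permutation
theorem foldl_min_perm {x y : Int} {t s : List Int} (hp : (x :: t).Perm (y :: s)) :
    List.foldl min x t = List.foldl min y s := by
  have h1 : PySem.List.min? (x :: t) (fun z => z) = some (List.foldl min x t) :=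
    PySem.List.min?_id_cons x t
  have h2 : PySem.List.min? (y :: s) (fun z => z) = some (List.foldl min y s) :=
    PySem.List.min?_id_cons y s
  have m1 := PySem.List.min?_mem h1
  have m2 := PySem.List.min?_mem h2
  have i1 := PySem.List.min?_isMin h1
  have i2 := PySem.List.min?_isMin h2
  exact le_antisymm (i1 _ (hp.symm.subset m2)) (i2 _ (hp.subset m1))

-- insertBy into an ascending list = sorting the list with the element appended
theorem insertBy_eq_sorted (x : Int) (t : List Int) (ht : t.Pairwise (· ≤ ·)) :
    heappush t x = PySem.List.sorted (t ++ [x]) (fun z => z) := by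
  have h := PySem.List.sorted_eq_foldl_insertBy (t ++ [x]) (fun z => z)
  rw [List.foldl_append] at h
  have h2 := PySem.List.sorted_eq_foldl_insertBy t (fun z => z)
  rw [PySem.List.sorted_eq_self_of_pairwise t _ ht] at h2
  rw [← h2] at h
  simpa [heappush] using h.symm

-- one-step unfolding equations for the two loops
theorem heapLoop_nil (K cnt : Int) : heapLoop K [] cnt = -1 := by
  rw [heapLoop.eq_def]

theorem heapLoop_done (K cnt a : Int) (t : List Int) (h : ¬ a < K) :
    heapLoop K (a :: t) cnt = cnt := by
  rw [heapLoop.eq_def]; simp [h]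

theorem heapLoop_single (K cnt a : Int) (h : a < K) : heapLoop K [a] cnt = -1 := by
  rw [heapLoop.eq_def]; simp [h]

theorem heapLoop_step (K cnt a b : Int) (t' : List Int) (h : a < K) :
    heapLoop K (a :: b :: t') cnt = heapLoop K (heappush t' (a + b * 2)) (cnt + 1) := by
  rw [heapLoop.eq_def]; simp [h]

theorem altLoop_nil (K cnt : Int) : altLoop K [] cnt = -1 := by
  rw [altLoop.eq_def]

theorem altLoop_done (K cnt x : Int) (t : List Int) (h : K ≤ List.foldl min x t) :
    altLoop K (x :: t) cnt = cnt := by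
  rw [altLoop.eq_def]; simp [h]

theorem altLoop_single (K cnt x : Int) (hK : ¬ K ≤ x) : altLoop K [x] cnt = -1 := by
  rw [altLoop.eq_def]; simp [hK]

theorem altLoop_step (K cnt x y : Int) (t t1 : List Int) (hK : ¬ K ≤ List.foldl min x t)
    (hlen : ¬ (x :: t).length < 2)
    (h : (x :: t).erase (List.foldl min x t) = y :: t1) :
    altLoop K (x :: t) cnt =
      altLoop K ((y :: t1).erase (List.foldl min y t1)
        ++ [List.foldl min x t + 2 * List.foldl min y t1]) (cnt + 1) := by
  rw [altLoop.eq_def]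
  simp only [hK, if_false, hlen]
  split
  · rename_i heq
    rw [h] at heq
    exact absurd heq (by simp)
  · rename_i y' t1' heq
    rw [h] at heq
    injection heq with e1 e2
    subst e1; subst e2
    rfl

-- main simulation: A's ascending heap vs B's unsorted working list
theorem loop_eq (K : Int) :
    ∀ (n : Nat) (qa qb : List Int) (cnt : Int), qa.length ≤ n →
      qa.Pairwise (· ≤ ·) → qa.Perm qb → heapLoop K qa cnt = altLoop K qb cnt := by
  intro n
  induction n with
  | zero =>
    intro qa qb cnt hlen _ hp
    have hqa : qa = [] := List.eq_nil_of_length_eq_zero (Nat.le_zero.mp hlen)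
    subst hqa
    have hqb : qb = [] := hp.symm.eq_nil
    subst hqb
    rw [heapLoop_nil, altLoop_nil]
  | succ n ih =>
    intro qa qb cnt hlen hs hp
    match qa with
    | [] =>
      have hqb : qb = [] := hp.symm.eq_nil
      subst hqb
      rw [heapLoop_nil, altLoop_nil]
    | a :: t =>
      match qb with
      | [] => exact absurd hp.eq_nil (by simp)
      | x :: s =>
        have hmin : List.foldl min x s = a := by
          have h := foldl_min_perm hp.symm
          rw [h]
          exact foldl_min_head a t (List.pairwise_cons.mp hs).1
        by_cases hK : a < K
        · rcases t with _ | ⟨b, t'⟩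
          · have hs0 : s = [] := by
              have h := hp.length_eq
              simp only [List.length_cons, List.length_nil] at h
              exact List.eq_nil_of_length_eq_zero (by omega)
            subst hs0
            have hxa : x = a := by simpa using hmin
            rw [heapLoop_single K cnt a hK, altLoop_single K cnt x (by rw [hxa]; omega)]
          · have hlen2 : ¬ (x :: s).length < 2 := by
              have h := hp.length_eq
              simp only [List.length_cons] at h ⊢
              omega
            have herase : ((x :: s).erase a).Perm (b :: t') := by
              have h := hp.symm.erase a
              simpa using h
            obtain ⟨y, t1, h1⟩ : ∃ y t1, (x :: s).erase a = y :: t1 := by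
              match h1 : (x :: s).erase a with
              | [] =>
                rw [h1] at herase
                exact absurd herase.symm.eq_nil (by simp)
              | y :: t1 => exact ⟨y, t1, rfl⟩
            rw [h1] at herase
            have hb : List.foldl min y t1 = b := by
              rw [foldl_min_perm herase]
              exact foldl_min_head b t'
                (List.pairwise_cons.mp (List.pairwise_cons.mp hs).2).1
            rw [heapLoop_step K cnt a b t' hK,
              altLoop_step K cnt x y s t1 (by rw [hmin]; omega) hlen2 (by rw [hmin, h1]),
              hmin, hb]
            -- recurse: new heap = sorted (t' ++ [a + b*2]); new list is a rearrangement of it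
            have hx2 : a + b * 2 = a + 2 * b := by ring
            have hsorted := insertBy_eq_sorted (a + b * 2) t'
              (List.pairwise_cons.mp (List.pairwise_cons.mp hs).2).2
            have p2 : ((y :: t1).erase b).Perm t' := by
              have h := herase.erase b
              simpa using h
            have hperm : (heappush t' (a + b * 2)).Perm
                ((y :: t1).erase b ++ [a + 2 * b]) := by
              rw [hsorted, hx2]
              exact (PySem.List.sorted_perm _ _ _).trans (p2.symm.append_right _)
            have hpair : (heappush t' (a + b * 2)).Pairwise (· ≤ ·) := by
              rw [hsorted]
              exact PySem.List.sorted_pairwise _ _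
            have hlen3 : (heappush t' (a + b * 2)).length ≤ n := by
              simp only [heappush, length_insertBy]
              simp at hlen
              omega
            exact ih _ _ (cnt + 1) hlen3 hpair hperm
        · rw [heapLoop_done K cnt a t hK, altLoop_done K cnt x s (by rw [hmin]; omega)]

-- ===== VERDICT (by name: the statement is the Claim_ definition above) =====
theorem solution_spec : Claim_equal_solution := by
  intro scoville K _ _
  unfold Spec_solution solution solution_alt
  have hfold : scoville.foldl (fun q x => heappush q x) [] =
      PySem.List.sorted scoville (fun z => z) := by
    rw [PySem.List.sorted_eq_foldl_insertBy scoville (fun z => z)]; rfl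
  rw [hfold]
  exact loop_eq K (PySem.List.sorted scoville (fun z => z)).length _ _ 0 le_rfl
    (PySem.List.sorted_pairwise _ _) (PySem.List.sorted_perm _ _ _)
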